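-- pv_equiv track=rewrite | github.com/jdeloren/aoc-common | python/2019/Day4.py | passcode
-- ===== SOURCE A (Python) =====
-- def passcode(digits, limiter=False):
--     data = str(digits)
--
--     repeats = 0
--     repeat = False
--     increase = True
--
--     last = data[0]
--     for i in range(1, len(data)):
--         if data[i] == last:
--             repeat = True if not limiter else repeat
--             repeats += 1
--         else:
--             repeat = True if (repeats == 1) else repeat
--             repeats = 0
--
--         if i == len(data)-1 and repeats == 1:
--             repeat = True
--             break
--
--         if data[i] < last:
--             increase = False
--             break
--
--         last = data[i]
--
--     return repeat and increase
-- ===== SOURCE B (Python) =====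
-- def passcode(digits, limiter=False):
--     data = str(digits)
--     increasing = all(a <= b for a, b in zip(data, data[1:]))
--     runs = []
--     count = 1
--     for prev, cur in zip(data, data[1:]):
--         if cur == prev:
--             count += 1
--         else:
--             runs.append(count)
--             count = 1
--     runs.append(count)
--     repeat = any(r == 2 for r in runs) if limiter else any(r >= 2 for r in runs)
--     return increasing and repeat
-- ===== Notes on version B (the rewrite author's own statement) =====
-- stated objective: idiomatic
-- what changed: A's single fused loop carrying repeat/repeats/increase flags with early breaks and an end-of-string special case is replaced by two independent passes: an adjacent-pairs monotonicity check and a run-length decomposition whose lengths are tested with any(==2) or any(>=2).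
import Mathlib
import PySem

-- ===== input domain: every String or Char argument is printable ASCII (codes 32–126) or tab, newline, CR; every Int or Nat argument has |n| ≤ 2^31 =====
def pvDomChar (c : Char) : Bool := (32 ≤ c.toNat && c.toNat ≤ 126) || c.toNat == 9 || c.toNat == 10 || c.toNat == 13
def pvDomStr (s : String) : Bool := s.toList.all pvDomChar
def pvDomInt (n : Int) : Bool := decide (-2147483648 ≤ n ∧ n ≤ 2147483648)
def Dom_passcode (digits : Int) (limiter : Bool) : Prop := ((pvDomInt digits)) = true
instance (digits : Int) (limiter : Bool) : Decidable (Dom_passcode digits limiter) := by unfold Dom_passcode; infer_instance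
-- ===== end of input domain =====

-- B replaces A's single fused loop (repeat/increase flags with breaks) by two independent passes:
-- an adjacent-pairs monotonicity check and a run-length decomposition (objective: idiomatic, same cost).

-- ===== PORT A =====
-- A's loop 'for i in range(1, len(data))' over the suffix after data[0], carrying (repeats, repeat, last);
-- 'increase = False; break' returns False at once, the end-of-string check returns True at once.
def passcodeLoopA (limiter : Bool) : List Char → Int → Bool → Char → Bool
  | [], _, rep, _ => rep
  | c :: rs, repeats, rep, last =>
    let rep' := if c = last then (if !limiter then true else rep)
                else (if repeats = 1 then true else rep)
    let repeats' := if c = last then repeats + 1 else 0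
    if rs = [] ∧ repeats' = 1 then true
    else if c < last then false
    else passcodeLoopA limiter rs repeats' rep' c

-- str(digits) is never empty for an int, so 'data[0]' never raises; the [] branch is unreachable.
def passcode (digits : Int) (limiter : Bool) : Bool :=
  match PySem.Int.toChars digits with
  | [] => false
  | c :: rs => passcodeLoopA limiter rs 0 false c

-- ===== PORT B =====
-- B's run-length loop 'for prev, cur in zip(data, data[1:])' with the trailing 'runs.append(count)'.
def runsB : List (Char × Char) → Int → List Int
  | [], count => [count]
  | (prev, cur) :: ps, count =>
    if cur = prev then runsB ps (count + 1) else count :: runsB ps 1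

def passcode_alt (digits : Int) (limiter : Bool) : Bool :=
  let data := PySem.Int.toChars digits
  let pairs := data.zip data.tail
  let increasing := pairs.all fun p => decide (p.1 ≤ p.2)
  let runs := runsB pairs 1
  let rep := if limiter then runs.any (fun r => r == 2) else runs.any (fun r => decide (r ≥ 2))
  increasing && rep

-- ===== PRECONDITION & SPEC =====
def Spec_passcode (digits : Int) (limiter : Bool) (out : Bool) : Prop := out = passcode_alt digits limiter
instance (digits : Int) (limiter : Bool) (out : Bool) : Decidable (Spec_passcode digits limiter out) := by unfold Spec_passcode; infer_instance

-- ===== CLAIM (what is proved, stated in full; the proofs are below) =====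
def Claim_equal_passcode : Prop := ∀ (digits : Int) (limiter : Bool), Dom_passcode digits limiter → Spec_passcode digits limiter (passcode digits limiter)

-- ===== LEMMAS AND PROOFS =====

-- A's loop with the 'data[i] < last' break removed: the pure repeat computation.
def specR (limiter : Bool) : List Char → Int → Bool → Char → Bool
  | [], _, rep, _ => rep
  | c :: rs, repeats, rep, last =>
    let rep' := if c = last then (if !limiter then true else rep)
                else (if repeats = 1 then true else rep)
    let repeats' := if c = last then repeats + 1 else 0
    if rs = [] ∧ repeats' = 1 then true
    else specR limiter rs repeats' rep' c

def nonDecB : List Char → Char → Bool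
  | [], _ => true
  | c :: rs, last => decide (last ≤ c) && nonDecB rs c

def hasIso : List Char → Int → Char → Bool
  | [], repeats, _ => repeats == 1
  | c :: rs, repeats, last =>
    if c = last then hasIso rs (repeats + 1) last
    else (repeats == 1) || hasIso rs 0 c

def anyEqB : List Char → Char → Bool
  | [], _ => false
  | c :: rs, last => (c == last) || anyEqB rs c

theorem loopA_eq (limiter : Bool) (rs : List Char) : ∀ (repeats : Int) (rep : Bool) (last : Char),
    passcodeLoopA limiter rs repeats rep last = (nonDecB rs last && specR limiter rs repeats rep last) := by
  induction rs with
  | nil => intro _ _ _; simp [passcodeLoopA, nonDecB, specR]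
  | cons c rs ih =>
    intro repeats rep last
    by_cases hc : c = last
    · subst hc
      by_cases hfin : rs = [] ∧ repeats + 1 = (1:Int)
      · obtain ⟨h1, h2⟩ := hfin
        subst h1
        simp [passcodeLoopA, specR, nonDecB, h2]
      · have ha : (decide (rs = []) && decide (repeats = (0:Int))) = false := by
          rcases Decidable.em (rs = []) with h1 | h1
          · have h2 : ¬ repeats = 0 := fun h2 => hfin ⟨h1, by omega⟩
            simp [h2]
          · simp [h1]
        simp [passcodeLoopA, specR, nonDecB, ih, ha]
    · by_cases hlt : c < last
      · have hle : ¬ last ≤ c := not_le.mpr hlt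
        simp [passcodeLoopA, specR, nonDecB, hc, hlt, hle]
      · have hle : last ≤ c := not_lt.mp hlt
        simp [passcodeLoopA, specR, nonDecB, hc, hlt, hle, ih]

theorem specR_true (rs : List Char) : ∀ (repeats : Int) (rep : Bool) (last : Char),
    (rs = [] → repeats ≠ 1) →
    specR true rs repeats rep last = (rep || hasIso rs repeats last) := by
  induction rs with
  | nil =>
    intro repeats rep last h
    have h1 : (repeats == (1:Int)) = false := by simpa using h rfl
    simp [specR, hasIso, h1]
  | cons c rs ih =>
    intro repeats rep last _
    by_cases hc : c = last
    · subst hc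
      by_cases hfin : rs = [] ∧ repeats + 1 = (1:Int)
      · obtain ⟨h1, h2⟩ := hfin
        subst h1
        have h0 : repeats = 0 := by omega
        subst h0
        simp [specR, hasIso]
      · have hne : rs = [] → repeats + 1 ≠ 1 := fun he h1 => hfin ⟨he, h1⟩
        have ha : (decide (rs = []) && decide (repeats = (0:Int))) = false := by
          rcases Decidable.em (rs = []) with h1 | h1
          · have h2 : ¬ repeats = 0 := fun h2 => hfin ⟨h1, by omega⟩
            simp [h2]
          · simp [h1]
        simp [specR, hasIso, ih _ _ _ hne, ha]
    · have h01 : ((0:Int) = 1) = False := by simp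
      have hrec := ih 0 (if repeats = 1 then true else rep) c (fun _ => by omega)
      simp only [specR, hasIso, if_neg hc, h01, and_false, if_false, hrec]
      by_cases h1 : repeats = (1:Int)
      · simp [h1]
      · have hb : (repeats == (1:Int)) = false := beq_eq_false_iff_ne.mpr h1
        simp [h1, hb]

theorem specR_false (rs : List Char) : ∀ (repeats : Int) (rep : Bool) (last : Char),
    (repeats = 1 → rep = true) →
    specR false rs repeats rep last = (rep || anyEqB rs last) := by
  induction rs with
  | nil => intro _ rep _ _; simp [specR, anyEqB]
  | cons c rs ih =>
    intro repeats rep last hinv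
    by_cases hc : c = last
    · subst hc
      by_cases hfin : rs = [] ∧ repeats + 1 = (1:Int)
      · obtain ⟨h1, h2⟩ := hfin
        subst h1
        simp [specR, anyEqB, h2]
      · have hrec := ih (repeats + 1) true c (fun _ => rfl)
        simp [specR, anyEqB, hrec]
    · have hrep : (if repeats = (1:Int) then true else rep) = rep := by
        split
        · next h => exact (hinv h).symm
        · rfl
      have hrec := ih 0 rep c (by intro h; omega)
      have hcb : (c == last) = false := by simpa using hc
      simp only [specR, anyEqB, if_neg hc, (by simp : ((0:Int) = 1) = False), and_false, if_false,
        hrep, hrec, hcb, Bool.false_or]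

theorem runsB_iso (rs : List Char) : ∀ (repeats : Int) (last : Char),
    (runsB ((last :: rs).zip rs) (repeats + 1)).any (fun r => r == 2) = hasIso rs repeats last := by
  induction rs with
  | nil =>
    intro repeats last
    simp only [List.zip_nil_right, runsB, List.any_cons, List.any_nil, Bool.or_false, hasIso]
    by_cases h : repeats = (1:Int)
    · simp [h]
    · have h2 : (repeats + 1 == (2:Int)) = false := beq_eq_false_iff_ne.mpr (by omega)
      simp [h, h2]
  | cons c rs ih =>
    intro repeats last
    simp only [List.zip_cons_cons, runsB, hasIso]
    by_cases hc : c = last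
    · rw [if_pos hc, if_pos hc]
      subst hc
      exact ih (repeats + 1) c
    · rw [if_neg hc, if_neg hc]
      have e : runsB ((c :: rs).zip rs) 1 = runsB ((c :: rs).zip rs) (0 + 1) := by norm_num
      rw [List.any_cons, e, ih 0 c]
      have h2 : (repeats + 1 == (2:Int)) = (repeats == (1:Int)) := by
        by_cases h : repeats = (1:Int) <;> simp [h]; omega
      rw [h2]

theorem runsB_ge2 (rs : List Char) : ∀ (k : Int) (last : Char), 1 ≤ k →
    (runsB ((last :: rs).zip rs) k).any (fun r => decide (r ≥ 2)) = (decide (k ≥ 2) || anyEqB rs last) := by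
  induction rs with
  | nil => intro k last _; simp [runsB, anyEqB]
  | cons c rs ih =>
    intro k last hk
    simp only [List.zip_cons_cons, runsB, anyEqB]
    by_cases hc : c = last
    · rw [if_pos hc]
      subst hc
      rw [ih (k + 1) c (by omega)]
      simp [show (2:Int) ≤ k + 1 from by omega]
    · rw [if_neg hc, List.any_cons, ih 1 c (by omega)]
      have hcb : (c == last) = false := by simpa using hc
      simp [hcb]

theorem zip_all_nonDec (rs : List Char) : ∀ (last : Char),
    ((last :: rs).zip rs).all (fun p => decide (p.1 ≤ p.2)) = nonDecB rs last := by
  induction rs with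
  | nil => intro _; simp [nonDecB]
  | cons c rs ih =>
    intro last
    simp only [List.zip_cons_cons, List.all_cons, nonDecB]
    rw [ih c]

-- ===== VERDICT (by name: the statement is the Claim_ definition above) =====
theorem passcode_spec : Claim_equal_passcode := by
  intro digits limiter _
  unfold Spec_passcode passcode passcode_alt
  cases h : PySem.Int.toChars digits with
  | nil => cases limiter <;> simp [runsB]
  | cons c rs =>
    simp only [List.tail_cons]
    rw [loopA_eq, zip_all_nonDec]
    cases limiter with
    | true =>
      rw [specR_true rs 0 false c (by intro _; omega)]
      have e : runsB ((c :: rs).zip rs) 1 = runsB ((c :: rs).zip rs) (0 + 1) := by norm_num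
      rw [if_pos rfl, e, runsB_iso rs 0 c]
      simp
    | false =>
      rw [specR_false rs 0 false c (by intro h1; omega)]
      rw [if_neg (by simp : ¬ false = true), runsB_ge2 rs 1 c (by omega)]
      simp
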